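-- pv_equiv track=rewrite | github.com/jeanbaptistemora/fluidattacks-universe2 | integrates/back/migrations/0153_delete_duplicated_vulns.py | _remove_empty_keys
-- ===== SOURCE A (Python) =====
-- from copy import (
--     deepcopy,
-- )
-- from typing import (
--     Any,
--     Dict,
--     List,
-- )
--
-- DuplicatedVulnsIdx = Dict[int, Dict[int, Dict[int, List[int]]]]
--
-- def _remove_empty_keys(obj: DuplicatedVulnsIdx) -> DuplicatedVulnsIdx:
--     _obj = deepcopy(obj)
--     for key in obj.keys():
--         for _key, _value in obj[key].items():
--             if not _value:
--                 _obj[key].pop(_key)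
--
--     obj = deepcopy(_obj)
--     for key, value in _obj.items():
--         if not value:
--             obj.pop(key)
--     return obj
-- ===== SOURCE B (Python) =====
-- from typing import (
--     Any,
--     Dict,
--     List,
-- )
--
-- DuplicatedVulnsIdx = Dict[int, Dict[int, Dict[int, List[int]]]]
--
--
-- def _remove_empty_keys(obj: DuplicatedVulnsIdx) -> DuplicatedVulnsIdx:
--     # Single build-fresh pass: no deepcopy, no destructive pop loops.
--     result: DuplicatedVulnsIdx = {}
--     for key, inner in obj.items():
--         filtered = {k: v for k, v in inner.items() if v}
--         if filtered:
--             result[key] = filtered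
--     return result
-- ===== Notes on version B (the rewrite author's own statement) =====
-- stated objective: simpler
-- what changed: Replaces A's two deepcopies plus two destructive pop-loops with a single pass that builds a fresh result dict, keeping each filtered inner dict only when non-empty.
import Mathlib
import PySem

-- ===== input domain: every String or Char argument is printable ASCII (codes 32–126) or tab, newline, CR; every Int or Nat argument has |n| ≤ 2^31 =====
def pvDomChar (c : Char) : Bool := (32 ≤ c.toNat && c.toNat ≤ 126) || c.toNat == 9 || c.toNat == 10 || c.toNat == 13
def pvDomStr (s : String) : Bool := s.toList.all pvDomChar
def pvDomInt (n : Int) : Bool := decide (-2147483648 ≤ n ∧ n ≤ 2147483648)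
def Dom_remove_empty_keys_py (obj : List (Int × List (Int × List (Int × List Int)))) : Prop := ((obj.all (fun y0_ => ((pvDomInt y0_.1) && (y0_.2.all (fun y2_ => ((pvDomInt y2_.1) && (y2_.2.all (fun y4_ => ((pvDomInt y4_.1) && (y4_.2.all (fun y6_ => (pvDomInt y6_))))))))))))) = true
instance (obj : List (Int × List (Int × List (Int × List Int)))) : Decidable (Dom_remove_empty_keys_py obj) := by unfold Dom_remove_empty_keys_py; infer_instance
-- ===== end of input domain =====

-- B rebuilds the result in one fresh nested pass instead of A's two deepcopies plus
-- two destructive pop loops (objective: simpler). Neither version mutates its argument;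
-- A returns deep copies of the inner values while B shares them (equal values either way).

-- ===== PORT A =====
-- dicts are modelled as PySem.Dict (insertion-ordered association list)
def remove_empty_keys_py (obj : List (Int × List (Int × List (Int × List Int)))) : List (Int × List (Int × List (Int × List Int))) :=
  let objD : PySem.Dict Int (List (Int × List (Int × List Int))) := PySem.Dict.mk obj
  -- _obj = deepcopy(obj)  (pure values here, so the copy is the value itself);
  -- first loop: for key in obj.keys(): for _key, _value in obj[key].items(): if not _value: _obj[key].pop(_key)
  -- (_key comes from the items of the dict it is popped from, so pop = erase: no KeyError under Pre_)
  let obj1 :=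
    objD.keys.foldl
      (fun d key =>
        (objD.getD key []).foldl
          (fun d kv =>
            if kv.2 = [] then
              PySem.Dict.modify d key [] (fun inner => ((PySem.Dict.mk inner).erase kv.1).items)
            else d)
          d)
      objD
  -- obj = deepcopy(_obj); second loop: for key, value in _obj.items(): if not value: obj.pop(key)
  let obj2 :=
    obj1.items.foldl (fun d kv => if kv.2 = [] then PySem.Dict.erase d kv.1 else d) obj1
  obj2.items

-- ===== PORT B =====
def remove_empty_keys_py_alt (obj : List (Int × List (Int × List (Int × List Int)))) : List (Int × List (Int × List (Int × List Int))) :=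
  obj.foldl
    (fun res kv =>
      let filtered := kv.2.filter (fun p => decide (p.2 ≠ []))
      if filtered ≠ [] then res ++ [(kv.1, filtered)] else res)
    []

-- ===== PRECONDITION & SPEC =====
-- Pre_ excludes association lists with duplicate keys at the outer or middle level:
-- Python dict keys are unique, so such lists do not represent any dict input A accepts.
def Pre_remove_empty_keys_py (obj : List (Int × List (Int × List (Int × List Int)))) : Prop :=
  (obj.map Prod.fst).Nodup ∧ ∀ p ∈ obj, (p.2.map Prod.fst).Nodup
instance (obj : List (Int × List (Int × List (Int × List Int)))) : Decidable (Pre_remove_empty_keys_py obj) := by unfold Pre_remove_empty_keys_py; infer_instance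

def pvWitness_remove_empty_keys_py : (List (Int × List (Int × List (Int × List Int)))) :=
  [(1, [(2, [(3, [4])]), (5, [])]), (6, [(7, [])])]

def Spec_remove_empty_keys_py (obj : List (Int × List (Int × List (Int × List Int)))) (out : List (Int × List (Int × List (Int × List Int)))) : Prop := out = remove_empty_keys_py_alt obj
instance (obj : List (Int × List (Int × List (Int × List Int)))) (out : List (Int × List (Int × List (Int × List Int)))) : Decidable (Spec_remove_empty_keys_py obj out) := by unfold Spec_remove_empty_keys_py; infer_instance

-- ===== CLAIM (what is proved, stated in full; the proofs are below) =====
def Claim_equal_remove_empty_keys_py : Prop := ∀ (obj : List (Int × List (Int × List (Int × List Int)))), Dom_remove_empty_keys_py obj → Pre_remove_empty_keys_py obj → Spec_remove_empty_keys_py obj (remove_empty_keys_py obj)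

-- ===== LEMMAS AND PROOFS =====

-- Folding "erase all entries with this key" over the empty-valued entries of l, starting from v,
-- is a filter of v.
theorem foldl_erase_filter {α : Type} (l : List (Int × List α)) (v : List (Int × List α)) :
    l.foldl (fun cur kv => if kv.2 = [] then cur.filter (fun p => !(p.1 == kv.1)) else cur) v
      = v.filter (fun p => !(l.any (fun q => decide (q.2 = []) && q.1 == p.1))) := by
  induction l generalizing v with
  | nil => simp
  | cons kv l ih =>
    by_cases h : kv.2 = []
    · simp only [List.foldl_cons, if_pos h, ih, List.filter_filter]
      refine List.filter_congr (fun p _ => ?_)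
      simp only [List.any_cons, h, decide_true, Bool.true_and, Bool.not_or]
      rw [Bool.beq_comm (a := kv.1)]
      exact Bool.and_comm _ _
    · simp only [List.foldl_cons, if_neg h, ih]
      refine List.filter_congr (fun p _ => ?_)
      simp only [List.any_cons, decide_eq_false h, Bool.false_and, Bool.false_or]

-- With pairwise-distinct keys, "some entry of l with p's key is empty" is just "p is empty", for p ∈ l.
theorem any_empty_eq_of_nodup {α : Type} (l : List (Int × List α))
    (hnd : (l.map Prod.fst).Nodup) (p : Int × List α) (hp : p ∈ l) :
    (l.any (fun q => decide (q.2 = []) && q.1 == p.1)) = decide (p.2 = []) := by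
  by_cases h : p.2 = []
  · simp only [h, decide_true]
    rw [List.any_eq_true]
    exact ⟨p, hp, by simp [h]⟩
  · simp only [h, decide_false]
    refine eq_false_of_ne_true (fun hc => ?_)
    rcases List.any_eq_true.mp hc with ⟨q, hq, hq2⟩
    simp only [Bool.and_eq_true, decide_eq_true_eq, beq_iff_eq] at hq2
    have := List.inj_on_of_nodup_map hnd hq hp hq2.2
    exact h (this ▸ hq2.1)

-- Folding erase over a nodup-keyed list against itself keeps exactly the nonempty-valued entries.
theorem erase_fold_self {α : Type} (l : List (Int × List α)) (hnd : (l.map Prod.fst).Nodup) :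
    l.foldl (fun cur kv => if kv.2 = [] then cur.filter (fun p => !(p.1 == kv.1)) else cur) l
      = l.filter (fun p => decide (p.2 ≠ [])) := by
  rw [foldl_erase_filter]
  refine List.filter_congr (fun p hp => ?_)
  rw [any_empty_eq_of_nodup l hnd p hp]
  simp

-- The second pass of A, pushed through .items: a Dict-erase fold is the list-erase fold of (d).items.
theorem pass2_items (l : List (Int × List (Int × List (Int × List Int))))
    (d : PySem.Dict Int (List (Int × List (Int × List Int)))) :
    (l.foldl (fun d kv => if kv.2 = [] then PySem.Dict.erase d kv.1 else d) d).items
      = l.foldl (fun cur kv => if kv.2 = [] then cur.filter (fun p => !(p.1 == kv.1)) else cur) d.items := by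
  induction l generalizing d with
  | nil => rfl
  | cons kv l ih =>
    by_cases h : kv.2 = []
    · simp only [List.foldl_cons, if_pos h, PySem.Dict.erase]
      exact ih ⟨List.filter (fun p => !(p.1 == kv.1)) d.items⟩
    · simp only [List.foldl_cons, if_neg h, ih]

-- The inner pop loop of A's first pass, at a fixed outer key k₀ that is present:
-- it only rewrites the entry at k₀, to the erase-fold of its value.
theorem inner_fold (k₀ : Int) (l : List (Int × List (Int × List Int)))
    (d : PySem.Dict Int (List (Int × List (Int × List Int))))
    (v₀ : List (Int × List (Int × List Int)))
    (hnd : (d.items.map Prod.fst).Nodup) (hmem : (k₀, v₀) ∈ d.items) :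
    (l.foldl
        (fun d kv =>
          if kv.2 = [] then
            PySem.Dict.modify d k₀ [] (fun inner => ((PySem.Dict.mk inner).erase kv.1).items)
          else d)
        d).items
      = d.items.map (fun p => if p.1 = k₀ then
          (k₀, l.foldl (fun cur kv => if kv.2 = [] then cur.filter (fun q => !(q.1 == kv.1)) else cur) v₀)
          else p) := by
  induction l generalizing d v₀ with
  | nil =>
    simp only [List.foldl_nil]
    conv_lhs => rw [← List.map_id d.items]
    refine List.map_congr_left (fun p hp => ?_)
    by_cases h : p.1 = k₀
    · have hpe : p = (k₀, v₀) := List.inj_on_of_nodup_map hnd hp hmem h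
      simpa [h] using hpe
    · simp [h]
  | cons kv l ih =>
    by_cases h : kv.2 = []
    · have hknd : d.keys.Nodup := by simpa [PySem.Dict.keys] using hnd
      have hget : d.getD k₀ [] = v₀ := PySem.Dict.getD_of_mem_items d hmem hknd []
      have hcont : d.contains k₀ = true :=
        (PySem.Dict.contains_iff_mem_keys d k₀).mpr (by
          simpa [PySem.Dict.keys] using List.mem_map_of_mem (f := Prod.fst) hmem)
      simp only [List.foldl_cons, if_pos h]
      set v₁ : List (Int × List (Int × List Int)) := ((PySem.Dict.mk v₀).erase kv.1).items with hv₁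
      have hmod : PySem.Dict.modify d k₀ [] (fun inner => ((PySem.Dict.mk inner).erase kv.1).items)
          = d.insert k₀ v₁ := by
        simp only [PySem.Dict.modify, hget, hv₁]
      rw [hmod]
      have hitems : (d.insert k₀ v₁).items
          = d.items.map (fun p => if (p.1 == k₀) = true then (k₀, v₁) else p) :=
        PySem.Dict.items_insert_of_contains d v₁ hcont
      have hmem₁ : (k₀, v₁) ∈ (d.insert k₀ v₁).items := by
        rw [hitems]
        exact List.mem_map.mpr ⟨(k₀, v₀), hmem, by simp⟩
      have hnd₁ : ((d.insert k₀ v₁).items.map Prod.fst).Nodup := by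
        rw [hitems, List.map_map]
        have : (Prod.fst ∘ fun p => if (p.1 == k₀) = true then (k₀, v₁) else p)
            = (Prod.fst : Int × List (Int × List (Int × List Int)) → Int) := by
          funext p
          by_cases hp : p.1 = k₀ <;> simp [hp]
        rw [this]; exact hnd
      rw [ih (d.insert k₀ v₁) v₁ hnd₁ hmem₁, hitems, List.map_map]
      refine List.map_congr_left (fun p hp => ?_)
      by_cases hpk : p.1 = k₀
      · simp [hpk, hv₁, PySem.Dict.erase]
      · simp [hpk]
    · simp only [List.foldl_cons, if_neg h, ih d v₀ hnd hmem]

-- A's whole first pass: each present key's entry is rewritten to the erase-fold of its value.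
theorem outer_fold (obj : List (Int × List (Int × List (Int × List Int)))) (ks : List Int)
    (d : PySem.Dict Int (List (Int × List (Int × List Int))))
    (hks : ks.Nodup) (hnd : (d.items.map Prod.fst).Nodup)
    (hsub : ∀ k ∈ ks, k ∈ d.items.map Prod.fst) :
    (ks.foldl
        (fun d key =>
          ((PySem.Dict.mk obj).getD key []).foldl
            (fun d kv =>
              if kv.2 = [] then
                PySem.Dict.modify d key [] (fun inner => ((PySem.Dict.mk inner).erase kv.1).items)
              else d)
            d)
        d).items
      = d.items.map (fun p => if p.1 ∈ ks then
          (p.1, ((PySem.Dict.mk obj).getD p.1 []).foldl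
              (fun cur kv => if kv.2 = [] then cur.filter (fun q => !(q.1 == kv.1)) else cur) p.2)
          else p) := by
  induction ks generalizing d with
  | nil => simp
  | cons k₀ ks ih =>
    rcases List.mem_map.mp (hsub k₀ (List.mem_cons_self)) with ⟨p₀, hp₀, hfst⟩
    have hmem : (k₀, p₀.2) ∈ d.items := by
      rw [← hfst]; exact hp₀
    have hd₁ := inner_fold k₀ ((PySem.Dict.mk obj).getD k₀ []) d p₀.2 hnd hmem
    simp only [List.foldl_cons]
    set d₁ := (((PySem.Dict.mk obj).getD k₀ []).foldl
        (fun d kv =>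
          if kv.2 = [] then
            PySem.Dict.modify d k₀ [] (fun inner => ((PySem.Dict.mk inner).erase kv.1).items)
          else d)
        d) with hd₁def
    have hfst : d₁.items.map Prod.fst = d.items.map Prod.fst := by
      rw [hd₁, List.map_map]
      refine List.map_congr_left (fun p hp => ?_)
      by_cases hp1 : p.1 = k₀ <;> simp [hp1]
    have hnd₁ : (d₁.items.map Prod.fst).Nodup := by
      rw [hfst]; exact hnd
    have hsub₁ : ∀ k ∈ ks, k ∈ d₁.items.map Prod.fst := by
      intro k hk
      rw [hfst]
      exact hsub k (List.mem_cons_of_mem _ hk)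
    rw [ih d₁ (List.Nodup.of_cons hks) hnd₁ hsub₁, hd₁, List.map_map]
    refine List.map_congr_left (fun p hp => ?_)
    have hk₀ : k₀ ∉ ks := (List.nodup_cons.mp hks).1
    by_cases hpk : p.1 = k₀
    · have hpe : p = (k₀, p₀.2) := List.inj_on_of_nodup_map hnd hp hmem hpk
      simp [hk₀, hpe]
    · by_cases hpks : p.1 ∈ ks <;> simp [hpk, hpks]

-- ===== VERDICT (by name: the statement is the Claim_ definition above) =====
theorem remove_empty_keys_py_spec : Claim_equal_remove_empty_keys_py := by
  intro obj _ hpre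
  rcases hpre with ⟨hnd, hinner⟩
  show remove_empty_keys_py obj = remove_empty_keys_py_alt obj
  -- B in closed form
  have hB : remove_empty_keys_py_alt obj
      = (obj.map (fun p => (p.1, p.2.filter (fun q => decide (q.2 ≠ []))))).filter
          (fun p => decide (p.2 ≠ [])) := by
    have hfa := PySem.List.foldl_append_if
        (fun kv : Int × List (Int × List (Int × List Int)) =>
          decide ((kv.2.filter fun p => decide (p.2 ≠ [])) ≠ []))
        (fun kv => (kv.1, kv.2.filter (fun p => decide (p.2 ≠ [])))) obj []
    simp only [decide_eq_true_eq] at hfa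
    unfold remove_empty_keys_py_alt
    rw [hfa, List.nil_append, List.filter_map]
    refine congrArg (List.map _) (List.filter_congr (fun q _ => ?_))
    simp [Function.comp]
  -- A in the same closed form
  unfold remove_empty_keys_py
  have hitems : (PySem.Dict.mk obj).items = obj := rfl
  have hkeys : (PySem.Dict.mk obj).keys = obj.map Prod.fst := rfl
  rw [hB]
  -- first pass
  rw [pass2_items]
  rw [hkeys, outer_fold obj (obj.map Prod.fst) (PySem.Dict.mk obj) hnd (by simpa using hnd)
      (fun k hk => by simpa using hk)]
  rw [hitems]
  have hpass1 : obj.map (fun p => if p.1 ∈ obj.map Prod.fst then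
        (p.1, ((PySem.Dict.mk obj).getD p.1 []).foldl
            (fun cur kv => if kv.2 = [] then cur.filter (fun q => !(q.1 == kv.1)) else cur) p.2)
        else p)
      = obj.map (fun p => (p.1, p.2.filter (fun q => decide (q.2 ≠ [])))) := by
    refine List.map_congr_left (fun p hp => ?_)
    have hmemk : p.1 ∈ obj.map Prod.fst := List.mem_map_of_mem hp
    have hget : (PySem.Dict.mk obj).getD p.1 [] = p.2 := by
      refine PySem.Dict.getD_of_mem_items _ ?_ (by simpa [PySem.Dict.keys] using hnd) []
      simpa using hp
    rw [if_pos hmemk, hget, erase_fold_self p.2 (hinner p hp)]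
  rw [hpass1]
  -- second pass
  rw [foldl_erase_filter]
  refine List.filter_congr (fun p hp => ?_)
  have hnd' : ((obj.map (fun p => (p.1, p.2.filter (fun q => decide (q.2 ≠ []))))).map Prod.fst).Nodup := by
    rw [List.map_map]
    simpa using hnd
  rw [any_empty_eq_of_nodup _ hnd' p hp]
  simp
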